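-- pv_equiv track=rewrite | github.com/AlessandroPerez/Gaussian-Shading | fresh_comprehensive_test.py | generate_fresh_prompts
-- ===== SOURCE A (Python) =====
-- def generate_fresh_prompts(num_images):
--     """Generate diverse prompts to ensure image variety"""
--     base_prompts = [
--         "a serene mountain landscape at sunset",
--         "a modern city skyline with glass buildings",
--         "a colorful flower garden in spring",
--         "an abstract geometric pattern",
--         "a peaceful forest with tall trees",
--         "a futuristic spacecraft in space",
--         "a vintage car on a country road",
--         "a cozy cottage with a garden",
--         "a stormy ocean with large waves",
--         "a desert scene with sand dunes"
--     ]
--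
--     # Generate variations
--     prompts = []
--     for i in range(num_images):
--         base = base_prompts[i % len(base_prompts)]
--         if i >= len(base_prompts):
--             variations = [
--                 f"{base} with dramatic lighting",
--                 f"{base} in watercolor style",
--                 f"{base} during golden hour",
--                 f"{base} with vibrant colors",
--                 f"{base} in minimalist style"
--             ]
--             prompts.append(variations[(i - len(base_prompts)) % len(variations)])
--         else:
--             prompts.append(base)
--
--     return prompts
-- ===== SOURCE B (Python) =====
-- def generate_fresh_prompts(num_images):
--     """Generate diverse prompts to ensure image variety"""
--     if num_images <= 0:
--         return []
--     base_prompts = [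
--         "a serene mountain landscape at sunset",
--         "a modern city skyline with glass buildings",
--         "a colorful flower garden in spring",
--         "an abstract geometric pattern",
--         "a peaceful forest with tall trees",
--         "a futuristic spacecraft in space",
--         "a vintage car on a country road",
--         "a cozy cottage with a garden",
--         "a stormy ocean with large waves",
--         "a desert scene with sand dunes"
--     ]
--     suffixes = [
--         " with dramatic lighting",
--         " in watercolor style",
--         " during golden hour",
--         " with vibrant colors",
--         " in minimalist style",
--     ]
--     # After the first 10 plain base prompts, the output is fully periodic with
--     # period lcm(10, 5) = 10: precompute that one block of ten suffixed prompts,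
--     # tile it enough times, and truncate.
--     block = [base + suffixes[j % len(suffixes)]
--              for j, base in enumerate(base_prompts)]
--     reps = (num_images + 9) // 10
--     return (base_prompts + block * reps)[:num_images]
-- ===== Notes on version B (the rewrite author's own statement) =====
-- stated objective: faster
-- what changed: B exploits that beyond the first 10 plain base prompts the output is periodic with period lcm(10,5)=10: it precomputes that one block of ten suffixed prompts once, tiles it with list multiplication and truncates with a slice, instead of A's per-index loop that branches and rebuilds the five f-string variations on every iteration.
import Mathlib
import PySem

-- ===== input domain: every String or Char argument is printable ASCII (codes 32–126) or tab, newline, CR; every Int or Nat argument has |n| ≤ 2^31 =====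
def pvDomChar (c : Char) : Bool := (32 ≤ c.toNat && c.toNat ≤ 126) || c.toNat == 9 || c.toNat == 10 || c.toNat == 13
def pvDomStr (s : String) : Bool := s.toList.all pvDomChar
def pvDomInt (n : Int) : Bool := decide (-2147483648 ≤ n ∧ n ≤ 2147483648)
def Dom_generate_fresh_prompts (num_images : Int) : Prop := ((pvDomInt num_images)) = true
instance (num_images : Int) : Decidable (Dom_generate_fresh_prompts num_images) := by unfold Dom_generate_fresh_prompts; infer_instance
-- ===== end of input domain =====

-- B tiles a precomputed periodic block instead of looping with per-index branching and formatting (return value only).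
-- ===== PORT A =====
def pvBase : List String :=
  ["a serene mountain landscape at sunset",
   "a modern city skyline with glass buildings",
   "a colorful flower garden in spring",
   "an abstract geometric pattern",
   "a peaceful forest with tall trees",
   "a futuristic spacecraft in space",
   "a vintage car on a country road",
   "a cozy cottage with a garden",
   "a stormy ocean with large waves",
   "a desert scene with sand dunes"]

-- len(base_prompts) = 10 and len(variations) = 5 are constants of the source; used as numerals below
-- body of A's loop (indices are always in range; the default "" of pyGetD is never used)
def pvAStep (prompts : List String) (i : Int) : List String :=
  let base := PySem.List.pyGetD pvBase (PySem.Int.mod i 10) ""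
  if 10 ≤ i then
    let variations :=
      [base ++ " with dramatic lighting",
       base ++ " in watercolor style",
       base ++ " during golden hour",
       base ++ " with vibrant colors",
       base ++ " in minimalist style"]
    prompts ++ [PySem.List.pyGetD variations (PySem.Int.mod (i - 10) 5) ""]
  else
    prompts ++ [base]

def generate_fresh_prompts (num_images : Int) : List String :=
  (PySem.List.pyRange 0 num_images 1).foldl pvAStep []

-- ===== PORT B =====
-- B's own copy of the base_prompts local (each port carries its Python's literal)
def pvBaseAlt : List String :=
  ["a serene mountain landscape at sunset",
   "a modern city skyline with glass buildings",
   "a colorful flower garden in spring",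
   "an abstract geometric pattern",
   "a peaceful forest with tall trees",
   "a futuristic spacecraft in space",
   "a vintage car on a country road",
   "a cozy cottage with a garden",
   "a stormy ocean with large waves",
   "a desert scene with sand dunes"]

def pvSuffixes : List String :=
  [" with dramatic lighting",
   " in watercolor style",
   " during golden hour",
   " with vibrant colors",
   " in minimalist style"]

-- block = [base + suffixes[j % len(suffixes)] for j, base in enumerate(base_prompts)]
-- (the index j % 5 is always in range, so pyGetD's default "" is never used)
def generate_fresh_prompts_alt (num_images : Int) : List String :=
  if num_images ≤ 0 then []
  else
    let block := (PySem.List.enumerate pvBaseAlt 0).map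
      (fun p => p.2 ++ PySem.List.pyGetD pvSuffixes (PySem.Int.mod p.1 5) "")
    let reps := PySem.Int.floordiv (num_images + 9) 10
    -- Python 'block * reps' (reps ≥ 1 here): flatten of replicate
    PySem.List.slice (pvBaseAlt ++ List.flatten (List.replicate reps.toNat block)) none (some num_images)

-- ===== PRECONDITION & SPEC =====
def Spec_generate_fresh_prompts (num_images : Int) (out : List String) : Prop := out = generate_fresh_prompts_alt num_images
instance (num_images : Int) (out : List String) : Decidable (Spec_generate_fresh_prompts num_images out) := by unfold Spec_generate_fresh_prompts; infer_instance

-- ===== CLAIM (what is proved, stated in full; the proofs are below) =====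
def Claim_equal_generate_fresh_prompts : Prop := ∀ (num_images : Int), Dom_generate_fresh_prompts num_images → Spec_generate_fresh_prompts num_images (generate_fresh_prompts num_images)

-- ===== LEMMAS AND PROOFS =====

-- the value of B's precomputed block (closed evaluation)
def pvBlockL : List String :=
  ["a serene mountain landscape at sunset with dramatic lighting",
   "a modern city skyline with glass buildings in watercolor style",
   "a colorful flower garden in spring during golden hour",
   "an abstract geometric pattern with vibrant colors",
   "a peaceful forest with tall trees in minimalist style",
   "a futuristic spacecraft in space with dramatic lighting",
   "a vintage car on a country road in watercolor style",
   "a cozy cottage with a garden during golden hour",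
   "a stormy ocean with large waves with vibrant colors",
   "a desert scene with sand dunes in minimalist style"]

theorem pvBlock_eval :
    (PySem.List.enumerate pvBaseAlt 0).map
      (fun p => p.2 ++ PySem.List.pyGetD pvSuffixes (PySem.Int.mod p.1 5) "") = pvBlockL := by
  rfl

-- length of a tiled block
theorem pv_len_flat_rep {α : Type} (b : List α) (r : Nat) :
    (List.flatten (List.replicate r b)).length = r * b.length := by
  induction r with
  | zero => simp
  | succ r ih => simp [List.replicate_succ, ih, Nat.succ_mul, Nat.add_comm]

-- taking k elements of the tiling does not depend on the number of copies, once enough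
theorem pv_take_flat_rep {α : Type} (b : List α) (r r' k : Nat) (h : r ≤ r')
    (hk : k ≤ r * b.length) :
    (List.flatten (List.replicate r' b)).take k = (List.flatten (List.replicate r b)).take k := by
  rw [show r' = r + (r' - r) by omega, List.replicate_add, List.flatten_append,
      List.take_append_of_le_length (by rw [pv_len_flat_rep]; exact hk)]

-- indexing the tiling is indexing the block modulo its length
theorem pv_get_flat_rep {α : Type} (b : List α) (r i : Nat) (h : i < r * b.length) :
    (List.flatten (List.replicate r b))[i]? = b[i % b.length]? := by
  induction r generalizing i with
  | zero => omega
  | succ r ih =>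
    rw [List.replicate_succ, List.flatten_cons]
    by_cases hi : i < b.length
    · rw [List.getElem?_append_left hi, Nat.mod_eq_of_lt hi]
    · have hb : 0 < b.length := by
        rcases Nat.eq_zero_or_pos b.length with h0 | h0
        · rw [h0, Nat.mul_zero] at h; omega
        · exact h0
      obtain ⟨j, rfl⟩ : ∃ j, i = b.length + j := ⟨i - b.length, by omega⟩
      rw [List.getElem?_append_right (by omega)]
      have := ih j (by rw [Nat.succ_mul] at h; omega)
      simpa [Nat.add_mod_left] using this

-- indexing a list of five "base ++ suffix" strings equals base ++ the indexed suffix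
theorem pvGetD_append (b d s0 s1 s2 s3 s4 : String) (j : Int) (h0 : 0 ≤ j) (h5 : j < 5) :
    PySem.List.pyGetD [b ++ s0, b ++ s1, b ++ s2, b ++ s3, b ++ s4] j d
      = b ++ PySem.List.pyGetD [s0, s1, s2, s3, s4] j d := by
  have : j = 0 ∨ j = 1 ∨ j = 2 ∨ j = 3 ∨ j = 4 := by omega
  rcases this with rfl | rfl | rfl | rfl | rfl <;> rfl

-- A's late loop body produces base[(i) % 10] ++ suffix[(i-10) % 5]
theorem pvAStep_late (acc : List String) (i : Int) (hi : 10 ≤ i) :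
    pvAStep acc i = acc ++
      [PySem.List.pyGetD pvBase (PySem.Int.mod i 10) ""
        ++ PySem.List.pyGetD pvSuffixes (PySem.Int.mod (i - 10) 5) ""] := by
  have h0 : (0:Int) ≤ PySem.Int.mod (i - 10) 5 := PySem.Int.mod_nonneg _ (by omega)
  have h5 : PySem.Int.mod (i - 10) 5 < 5 := PySem.Int.mod_lt _ (by omega)
  show (if 10 ≤ i then _ else _) = _
  rw [if_pos hi]
  exact congrArg (fun x => acc ++ [x])
    (pvGetD_append (PySem.List.pyGetD pvBase (PySem.Int.mod i 10) "") ""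
      " with dramatic lighting" " in watercolor style" " during golden hour"
      " with vibrant colors" " in minimalist style" _ h0 h5)

-- the element A appends at index 10+k is exactly block[k % 10]
theorem pv_elem_eq (k : Nat) :
    PySem.List.pyGetD pvBase (PySem.Int.mod (10 + (k:Int)) 10) ""
      ++ PySem.List.pyGetD pvSuffixes (PySem.Int.mod ((10 + (k:Int)) - 10) 5) ""
      = pvBlockL.getD (k % 10) "" := by
  have h10 : PySem.Int.mod (10 + (k:Int)) 10 = ((k % 10 : Nat) : Int) := by
    have h := PySem.Int.mod_natCast (10 + k) 10
    rw [show (((10:Nat)):Int) = (10:Int) from by norm_cast] at h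
    rw [show (10 + (k:Int)) = (((10 + k : Nat)) : Int) by push_cast; ring, h]
    exact Int.natCast_inj.mpr (by omega)
  have h5 : PySem.Int.mod ((10 + (k:Int)) - 10) 5 = ((k % 5 : Nat) : Int) := by
    have h := PySem.Int.mod_natCast k 5
    rw [show (((5:Nat)):Int) = (5:Int) from by norm_cast] at h
    rw [show ((10 + (k:Int)) - 10) = ((k : Nat) : Int) by ring, h]
  rw [h10, h5]
  have hj5 : k % 5 = (k % 10) % 5 := (Nat.mod_mod_of_dvd k (by norm_num)).symm
  rw [hj5]
  have hj : k % 10 < 10 := Nat.mod_lt _ (by norm_num)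
  set j := k % 10 with hjdef
  interval_cases j <;> rfl

-- closed form of B at 10 + k
theorem pv_alt_eq (k : Nat) :
    generate_fresh_prompts_alt (10 + (k:Int))
      = pvBaseAlt ++ (List.flatten (List.replicate ((19 + k) / 10) pvBlockL)).take k := by
  have hreps : (PySem.Int.floordiv (10 + (k:Int) + 9) 10).toNat = (19 + k) / 10 := by
    have h := PySem.Int.floordiv_natCast (19 + k) 10
    rw [show (((10:Nat)):Int) = (10:Int) from by norm_cast] at h
    rw [show (10 + (k:Int) + 9) = (((19 + k : Nat)) : Int) by push_cast; ring, h]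
    exact Int.toNat_natCast _
  unfold generate_fresh_prompts_alt
  rw [if_neg (by omega)]
  simp only [pvBlock_eval]
  rw [hreps, show (10 + (k:Int)) = (((10 + k : Nat)) : Int) by push_cast; ring,
      PySem.List.slice_to_natCast]
  have hL : pvBaseAlt.length = 10 := rfl
  rw [List.take_append, hL, List.take_of_length_le (by rw [hL]; omega),
      show 10 + k - 10 = k by omega]

theorem pv_big (m : Nat) :
    generate_fresh_prompts (10 + (m : Int)) = generate_fresh_prompts_alt (10 + (m : Int)) := by
  induction m with
  | zero =>
    rw [pv_alt_eq 0]
    rfl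
  | succ k ih =>
    have hA : PySem.List.pyRange 0 (10 + (k : Int) + 1) 1
        = PySem.List.pyRange 0 (10 + (k : Int)) 1 ++ [10 + (k : Int)] :=
      PySem.List.pyRange_one_succ_right (by omega)
    have hkcast : ((k + 1 : Nat) : Int) = (k : Int) + 1 := by push_cast; ring
    rw [hkcast, show (10 : Int) + ((k : Int) + 1) = 10 + (k:Int) + 1 by ring]
    unfold generate_fresh_prompts
    rw [hA, List.foldl_append, List.foldl_cons, List.foldl_nil,
        pvAStep_late _ _ (by omega)]
    have ihA : (PySem.List.pyRange 0 (10 + (k:Int)) 1).foldl pvAStep []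
        = generate_fresh_prompts_alt (10 + (k:Int)) := ih
    rw [ihA, pv_alt_eq k, pv_elem_eq k,
        show (10 + (k:Int) + 1) = 10 + ((k + 1 : Nat) : Int) by push_cast; ring,
        pv_alt_eq (k + 1)]
    have hlen : pvBlockL.length = 10 := rfl
    have hmono : (19 + k) / 10 ≤ (19 + (k + 1)) / 10 := by omega
    have hk1 : k + 1 ≤ ((19 + (k + 1)) / 10) * 10 := by omega
    have hk0 : k ≤ ((19 + k) / 10) * 10 := by omega
    have htake : (List.flatten (List.replicate ((19 + (k+1)) / 10) pvBlockL)).take (k + 1)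
        = (List.flatten (List.replicate ((19 + k) / 10) pvBlockL)).take k
          ++ [pvBlockL.getD (k % 10) ""] := by
      rw [List.take_add_one,
          pv_take_flat_rep pvBlockL ((19 + k) / 10) ((19 + (k+1)) / 10) k hmono (by rw [hlen]; exact hk0),
          pv_get_flat_rep pvBlockL _ k (by rw [hlen]; exact hk1), hlen]
      congr 1
      have hj : k % 10 < 10 := Nat.mod_lt _ (by norm_num)
      set j := k % 10 with hjdef
      interval_cases j <;> rfl
    rw [htake, List.append_assoc]

theorem pv_small (n : Int) (h0 : 0 ≤ n) (h10 : n ≤ 10) :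
    generate_fresh_prompts n = generate_fresh_prompts_alt n := by
  interval_cases n <;> rfl

-- ===== VERDICT (by name: the statement is the Claim_ definition above) =====
theorem generate_fresh_prompts_spec : Claim_equal_generate_fresh_prompts := by
  intro n _
  unfold Spec_generate_fresh_prompts
  by_cases h : n ≤ 10
  · by_cases h0 : 0 ≤ n
    · exact pv_small n h0 h
    · have hA : PySem.List.pyRange 0 n 1 = [] := PySem.List.pyRange_one_eq_nil (by omega)
      unfold generate_fresh_prompts generate_fresh_prompts_alt
      rw [hA, if_pos (by omega)]
      rfl
  · obtain ⟨m, rfl⟩ : ∃ m : Nat, n = 10 + (m : Int) := ⟨(n - 10).toNat, by omega⟩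
    exact pv_big m
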